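-- pv_equiv track=rewrite | github.com/loociano/advent-of-code | day05/main.py | _decode_opcode
-- ===== SOURCE A (Python) =====
-- def _decode_opcode(num):
--     digits = [0, 0, 0, 0, 0]
--     pos = len(digits) - 1
--     while num > 0 and pos >= 0:
--         digits[pos] = num % 10
--         num //= 10
--         pos -= 1
--     return digits
-- ===== SOURCE B (Python) =====
-- def _decode_opcode(num):
--     if num <= 0:
--         return [0, 0, 0, 0, 0]
--     return [num // 10 ** (4 - i) % 10 for i in range(5)]
-- ===== Notes on version B (the rewrite author's own statement) =====
-- stated objective: simpler
-- what changed: Replaces the mutating while-loop that peels digits back-to-front into a preallocated list with a closed-form comprehension computing each of the 5 digit positions directly as num // 10**(4-i) % 10 (guarding num <= 0, where the loop never runs).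
import Mathlib
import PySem

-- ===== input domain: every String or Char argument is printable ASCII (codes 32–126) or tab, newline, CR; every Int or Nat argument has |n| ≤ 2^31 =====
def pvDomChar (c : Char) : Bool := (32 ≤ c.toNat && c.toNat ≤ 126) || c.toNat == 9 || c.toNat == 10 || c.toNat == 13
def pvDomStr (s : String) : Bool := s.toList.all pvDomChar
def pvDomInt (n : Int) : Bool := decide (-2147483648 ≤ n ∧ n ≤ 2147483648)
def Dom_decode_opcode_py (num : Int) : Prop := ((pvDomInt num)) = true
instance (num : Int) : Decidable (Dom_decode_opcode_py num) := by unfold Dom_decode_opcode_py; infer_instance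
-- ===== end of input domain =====

-- B replaces A's mutating digit-peeling while-loop with a closed-form per-position
-- digit formula (objective: simpler); same return value for every Int input.

-- ===== PORT A =====
-- while num > 0 and pos >= 0: digits[pos] = num % 10; num //= 10; pos -= 1
def decodeLoopA (digits : List Int) (num : Int) (pos : Int) : List Int :=
  if h : num > 0 ∧ pos ≥ 0 then
    decodeLoopA (PySem.List.pySetD digits pos (PySem.Int.mod num 10))
      (PySem.Int.floordiv num 10) (pos - 1)
  else digits
termination_by (pos + 1).toNat
decreasing_by omega

def decode_opcode_py (num : Int) : List Int :=
  let digits : List Int := [0, 0, 0, 0, 0]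
  let pos : Int := PySem.List.len digits - 1
  decodeLoopA digits num pos

-- ===== PORT B =====
def decode_opcode_py_alt (num : Int) : List Int :=
  if num ≤ 0 then [0, 0, 0, 0, 0]
  else (PySem.List.pyRange 0 5 1).map
    (fun i => PySem.Int.mod (PySem.Int.floordiv num (10 ^ (4 - i).toNat)) 10)

-- ===== PRECONDITION & SPEC =====
def Spec_decode_opcode_py (num : Int) (out : List Int) : Prop := out = decode_opcode_py_alt num
instance (num : Int) (out : List Int) : Decidable (Spec_decode_opcode_py num out) := by unfold Spec_decode_opcode_py; infer_instance

-- ===== CLAIM (what is proved, stated in full; the proofs are below) =====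
def Claim_equal_decode_opcode_py : Prop := ∀ (num : Int), Dom_decode_opcode_py num → Spec_decode_opcode_py num (decode_opcode_py num)

-- ===== LEMMAS AND PROOFS =====

theorem decodeLoopA_stop (digits : List Int) (num pos : Int)
    (h : ¬ (num > 0 ∧ pos ≥ 0)) : decodeLoopA digits num pos = digits := by
  rw [decodeLoopA]; simp [h]

theorem decodeLoopA_step (digits : List Int) (num pos : Int)
    (h1 : num > 0) (h2 : pos ≥ 0) :
    decodeLoopA digits num pos =
      decodeLoopA (PySem.List.pySetD digits pos (PySem.Int.mod num 10))
        (PySem.Int.floordiv num 10) (pos - 1) := by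
  rw [decodeLoopA]; simp [h1, h2]

-- ===== VERDICT (by name: the statement is the Claim_ definition above) =====
theorem decode_opcode_py_spec : Claim_equal_decode_opcode_py := by
  intro num _
  unfold Spec_decode_opcode_py decode_opcode_py decode_opcode_py_alt
  simp only [PySem.List.len_eq, List.length_cons, List.length_nil]
  by_cases h0 : num ≤ 0
  · rw [decodeLoopA_stop _ _ _ (by omega)]
    simp [h0]
  · push_neg at h0
    rw [if_neg (by omega)]
    have hfd : ∀ a : Int, PySem.Int.floordiv a 10 = a / 10 :=
      fun a => PySem.Int.floordiv_eq_ediv_of_pos (by omega)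
    have hmd : ∀ a : Int, PySem.Int.mod a 10 = a % 10 :=
      fun a => PySem.Int.mod_eq_emod_of_pos (by omega)
    have hr : PySem.List.pyRange 0 5 1 = [0, 1, 2, 3, 4] := by decide
    -- unfold the five iterations of A's loop
    rw [decodeLoopA_step _ _ _ (by omega) (by omega)]
    set n1 := PySem.Int.floordiv num 10 with hn1
    by_cases h1 : n1 > 0
    · rw [decodeLoopA_step _ _ _ h1 (by omega)]
      set n2 := PySem.Int.floordiv n1 10 with hn2
      by_cases h2 : n2 > 0
      · rw [decodeLoopA_step _ _ _ h2 (by omega)]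
        set n3 := PySem.Int.floordiv n2 10 with hn3
        by_cases h3 : n3 > 0
        · rw [decodeLoopA_step _ _ _ h3 (by omega)]
          set n4 := PySem.Int.floordiv n3 10 with hn4
          by_cases h4 : n4 > 0
          · rw [decodeLoopA_step _ _ _ h4 (by omega)]
            rw [decodeLoopA_stop _ _ _ (by omega)]
            simp only [hn1, hn2, hn3, hn4, hfd, hmd] at *
            simp [PySem.List.pySetD, PySem.List.pySet?, PySem.List.pyIdx?, hr, List.set]
            norm_num [PySem.Int.mod_eq_emod_of_pos, PySem.Int.floordiv_eq_ediv_of_pos,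
              show Int.toNat 4 = 4 from rfl, show Int.toNat 3 = 3 from rfl,
              show Int.toNat 2 = 2 from rfl, show Int.toNat 1 = 1 from rfl]
            omega
          · rw [decodeLoopA_stop _ _ _ (by omega)]
            simp only [hn1, hn2, hn3, hn4, hfd, hmd] at *
            simp [PySem.List.pySetD, PySem.List.pySet?, PySem.List.pyIdx?, hr, List.set]
            norm_num [PySem.Int.mod_eq_emod_of_pos, PySem.Int.floordiv_eq_ediv_of_pos,
              show Int.toNat 4 = 4 from rfl, show Int.toNat 3 = 3 from rfl,
              show Int.toNat 2 = 2 from rfl, show Int.toNat 1 = 1 from rfl]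
            omega
        · rw [decodeLoopA_stop _ _ _ (by omega)]
          simp only [hn1, hn2, hn3, hfd, hmd] at *
          simp [PySem.List.pySetD, PySem.List.pySet?, PySem.List.pyIdx?, hr, List.set]
          norm_num [PySem.Int.mod_eq_emod_of_pos, PySem.Int.floordiv_eq_ediv_of_pos,
            show Int.toNat 4 = 4 from rfl, show Int.toNat 3 = 3 from rfl,
            show Int.toNat 2 = 2 from rfl, show Int.toNat 1 = 1 from rfl]
          omega
      · rw [decodeLoopA_stop _ _ _ (by omega)]
        simp only [hn1, hn2, hfd, hmd] at *
        simp [PySem.List.pySetD, PySem.List.pySet?, PySem.List.pyIdx?, hr, List.set]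
        omega
    · rw [decodeLoopA_stop _ _ _ (by omega)]
      simp only [hn1, hfd, hmd] at *
      simp [PySem.List.pySetD, PySem.List.pySet?, PySem.List.pyIdx?, hr, List.set]
      omega
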